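-- pv_equiv track=rewrite | github.com/ecamposgo/data-cleaning-pandas | your-code/src.py | fechas
-- ===== SOURCE A (Python) =====
-- def fechas(date):
--
--     months = ["Jan","Feb","Mar","Apr","May","Jun","Jul","Aug","Sep","Oct","Nov","Dec"]
--
--     for i in months:
--         if date.find(i) >= 0:
--             date = date.strip()
--             date = date.replace('Reported','')
--
--             if len(date) == 11:
--                 return date
--
--     return "01-01-1900"
-- ===== SOURCE B (Python) =====
-- MONTHS = ("Jan", "Feb", "Mar", "Apr", "May", "Jun",
--           "Jul", "Aug", "Sep", "Oct", "Nov", "Dec")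
--
--
-- def fechas(date):
--     def go(d, i):
--         if i >= len(MONTHS):
--             return "01-01-1900"
--         if MONTHS[i] not in d:
--             return go(d, i + 1)
--         cleaned = d.strip().replace('Reported', '')
--         return cleaned if len(cleaned) == 11 else go(cleaned, i + 1)
--     return go(date, 0)
-- ===== Notes on version B (the rewrite author's own statement) =====
-- stated objective: alternative
-- what changed: A's for-loop with mutable rebinding and find-index comparisons becomes a tail-recursive helper over a month index with early exit, idiomatic substring membership, and an inverted skip-first guard; same cost.
import Mathlib
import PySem

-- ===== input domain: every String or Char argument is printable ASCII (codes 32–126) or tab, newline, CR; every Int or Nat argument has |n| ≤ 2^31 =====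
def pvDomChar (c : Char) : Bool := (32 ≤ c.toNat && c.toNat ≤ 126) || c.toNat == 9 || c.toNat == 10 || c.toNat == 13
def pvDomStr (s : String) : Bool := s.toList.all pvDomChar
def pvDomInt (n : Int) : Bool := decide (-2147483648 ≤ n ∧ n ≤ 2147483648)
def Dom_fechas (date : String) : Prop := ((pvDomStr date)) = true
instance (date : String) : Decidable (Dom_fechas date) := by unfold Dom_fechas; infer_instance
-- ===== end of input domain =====

-- B replaces A's for-loop with mutable rebinding by a tail-recursive helper over a month index
-- with an inverted skip guard and `in`-membership instead of `.find(m) >= 0`; same cost (alternative decomposition).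


-- ===== PORT A =====
-- months = ["Jan", ..., "Dec"]
def fechasMonthsA : List String :=
  ["Jan","Feb","Mar","Apr","May","Jun","Jul","Aug","Sep","Oct","Nov","Dec"]

-- the for-loop over months, carrying the (rebindable) date as state; return inside the loop = stop
def fechasLoopA : List String → String → String
  | [], _ => "01-01-1900"
  | i :: rest, date =>
    if 0 ≤ PySem.Str.find date i then
      let date := PySem.Str.strip date
      let date := PySem.Str.replace date "Reported" ""
      if PySem.Str.len date = 11 then date else fechasLoopA rest date
    else fechasLoopA rest date

def fechas (date : String) : String := fechasLoopA fechasMonthsA date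

-- ===== PORT B =====
def fechasMonthsB : List String :=
  ["Jan","Feb","Mar","Apr","May","Jun","Jul","Aug","Sep","Oct","Nov","Dec"]

-- def go(d, i): recursion over the month index with early exit; `MONTHS[i] not in d` skip guard
def fechasGoB (d : String) (i : Nat) : String :=
  if h : i < fechasMonthsB.length then
    if !(PySem.Str.isIn fechasMonthsB[i] d) then fechasGoB d (i + 1)
    else
      let cleaned := PySem.Str.replace (PySem.Str.strip d) "Reported" ""
      if PySem.Str.len cleaned = 11 then cleaned else fechasGoB cleaned (i + 1)
  else "01-01-1900"
termination_by fechasMonthsB.length - i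

def fechas_alt (date : String) : String := fechasGoB date 0

-- ===== PRECONDITION & SPEC =====
def Spec_fechas (date : String) (out : String) : Prop := out = fechas_alt date
instance (date : String) (out : String) : Decidable (Spec_fechas date out) := by unfold Spec_fechas; infer_instance

-- ===== CLAIM (what is proved, stated in full; the proofs are below) =====
def Claim_equal_fechas : Prop := ∀ (date : String), Dom_fechas date → Spec_fechas date (fechas date)

-- ===== LEMMAS AND PROOFS =====

theorem fechas_find_iff_isIn (d m : String) :
    (0 ≤ PySem.Str.find d m) ↔ PySem.Str.isIn m d = true := by
  rw [PySem.Str.find_nonneg_iff, PySem.Str.isIn_iff_infix]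

theorem fechasGoB_eq_loop (k : Nat) : ∀ (i : Nat) (d : String),
    fechasMonthsB.length ≤ i + k → fechasGoB d i = fechasLoopA (fechasMonthsA.drop i) d := by
  induction k with
  | zero =>
    intro i d h
    rw [fechasGoB, dif_neg (by omega), List.drop_eq_nil_of_le (by simpa using h)]
    rfl
  | succ k ih =>
    intro i d h
    by_cases hi : i < fechasMonthsB.length
    · rw [fechasGoB, dif_pos hi,
        List.drop_eq_getElem_cons (l := fechasMonthsA) (by simpa using hi)]
      have hm : fechasMonthsA[i]'(by simpa using hi) = fechasMonthsB[i] := rfl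
      rw [fechasLoopA, hm]
      by_cases hin : PySem.Str.isIn fechasMonthsB[i] d = true
      · rw [if_pos ((fechas_find_iff_isIn d _).mpr hin), hin]
        simp only [Bool.not_true, Bool.false_eq_true, if_false]
        split
        · rfl
        · exact ih (i + 1) _ (by omega)
      · have hfalse : PySem.Str.isIn fechasMonthsB[i] d = false := by
          simpa using hin
        rw [if_neg (fun hf => hin ((fechas_find_iff_isIn d _).mp hf)), hfalse]
        simp only [Bool.not_false, if_true]
        exact ih (i + 1) d (by omega)
    · rw [fechasGoB, dif_neg hi, List.drop_eq_nil_of_le (by simpa using Nat.le_of_not_lt hi)]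
      rfl

-- ===== VERDICT (by name: the statement is the Claim_ definition above) =====
theorem fechas_spec : Claim_equal_fechas := by
  intro date _
  show fechas date = fechas_alt date
  rw [fechas, fechas_alt, fechasGoB_eq_loop fechasMonthsB.length 0 date (by omega)]
  rfl
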